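-- pv_equiv track=rewrite | github.com/HsinPu/opensprite | src/opensprite/tools/shell.py | _read_shell_token
-- ===== SOURCE A (Python) =====
-- def _read_shell_token(command: str, start: int) -> tuple[str, int]:
--     """Read one shell token, preserving quotes/escapes, starting at *start*."""
--     i = start
--     n = len(command)
--
--     while i < n:
--         ch = command[i]
--         if ch.isspace() or ch in ";|&()":
--             break
--         if ch == "'":
--             i += 1
--             while i < n and command[i] != "'":
--                 i += 1
--             if i < n:
--                 i += 1
--             continue
--         if ch == '"':
--             i += 1
--             while i < n:
--                 inner = command[i]
--                 if inner == "\\" and i + 1 < n: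
--                     i += 2
--                     continue
--                 if inner == '"':
--                     i += 1
--                     break
--                 i += 1
--             continue
--         if ch == "\\" and i + 1 < n:
--             i += 2
--             continue
--         i += 1
--
--     return command[start:i], i
-- ===== SOURCE B (Python) =====
-- def _read_shell_token(command: str, start: int) -> tuple[str, int]:
--     """Read one shell token, preserving quotes/escapes, starting at *start*.
--
--     Instead of scanning quoted runs character by character, jump over them
--     with str.find: a single quote is closed by the next "'" ; a double-quoted
--     run is traversed by repeatedly locating the next backslash-or-quote.
--     """
--     n = len(command)
--     i = start
--     while i < n:
--         ch = command[i]
--         if ch.isspace() or ch in ";|&()":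
--             break
--         if ch == "'":
--             j = command.find("'", i + 1)
--             i = n if j < 0 else j + 1
--         elif ch == '"':
--             i = _dq_end(command, i + 1)
--         elif ch == "\\" and i + 1 < n:
--             i += 2
--         else:
--             i += 1
--     return command[start:i], i
--
--
-- def _dq_end(command: str, i: int) -> int:
--     """Index just past a double-quoted run that was opened before *i*."""
--     n = len(command)
--     while True:
--         b = command.find("\\", i)
--         q = command.find('"', i)
--         if b == -1 and q == -1:
--             return n
--         if b != -1 and (q == -1 or b < q):
--             if b + 1 < n:
--                 i = b + 2
--             else:
--                 return n
--         else:
--             return q + 1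
-- ===== Notes on version B (the rewrite author's own statement) =====
-- stated objective: alternative
-- what changed: Quoted runs are no longer scanned character by character: one str.find closes a single-quoted run, and a double-quoted run is traversed by repeatedly find-ing the next backslash-or-quote, so A's inner per-character while-loops disappear.
-- outside the precondition, e.g. on _read_shell_token("ba'&", -2): A returns ("'", 3), B returns ("'&", 4); on _read_shell_token('ab', -1): A returns ('b', 2), B returns ('b', 2)
import Mathlib
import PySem

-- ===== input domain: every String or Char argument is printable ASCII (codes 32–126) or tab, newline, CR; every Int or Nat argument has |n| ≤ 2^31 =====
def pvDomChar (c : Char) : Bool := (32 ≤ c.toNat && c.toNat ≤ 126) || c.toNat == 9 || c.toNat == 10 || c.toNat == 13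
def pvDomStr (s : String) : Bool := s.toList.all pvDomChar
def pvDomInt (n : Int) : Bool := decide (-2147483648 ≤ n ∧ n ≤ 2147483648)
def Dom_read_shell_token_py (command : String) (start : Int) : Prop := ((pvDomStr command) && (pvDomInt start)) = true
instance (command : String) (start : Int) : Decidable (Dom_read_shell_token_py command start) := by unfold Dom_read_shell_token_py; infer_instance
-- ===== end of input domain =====

-- B replaces A's character-by-character quote scanning with str.find jumps: one find closes a
-- single-quoted run, and a double-quoted run is traversed by repeatedly locating the next
-- backslash-or-quote (alternative decomposition, same asymptotic cost).
-- Each Python while-loop is ported as structural recursion on a Nat fuel `k`; every iteration moves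
-- the index forward by at least 1, so the fuel supplied at each call site always suffices.

-- ===== PORT A =====
-- A's inner single-quote while-loop (plus the trailing `if i < n: i += 1`)
def pvSqScan (cs : List Char) (n : Int) : Nat → Int → Int
  | 0, i => i
  | k + 1, i =>
    if i < n then
      match PySem.List.pyGet? cs i with
      | none => i
      | some ch => if ch ≠ '\'' then pvSqScan cs n k (i + 1) else i + 1
    else i

-- A's inner double-quote while-loop
def pvDqScan (cs : List Char) (n : Int) : Nat → Int → Int
  | 0, i => i
  | k + 1, i =>
    if i < n then
      match PySem.List.pyGet? cs i with
      | none => i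
      | some inner =>
        if inner = '\\' ∧ i + 1 < n then pvDqScan cs n k (i + 2)
        else if inner = '"' then i + 1
        else pvDqScan cs n k (i + 1)
    else i

-- A's outer while-loop
def pvALoop (cs : List Char) (n : Int) : Nat → Int → Int
  | 0, i => i
  | k + 1, i =>
    if i < n then
      match PySem.List.pyGet? cs i with
      | none => i   -- Python raises IndexError here; excluded by Pre_
      | some ch =>
        if PySem.Chars.isspace ch || ch = ';' || ch = '|' || ch = '&' || ch = '(' || ch = ')' then i
        else if ch = '\'' then pvALoop cs n k (pvSqScan cs n k (i + 1))
        else if ch = '"' then pvALoop cs n k (pvDqScan cs n k (i + 1))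
        else if ch = '\\' ∧ i + 1 < n then pvALoop cs n k (i + 2)
        else pvALoop cs n k (i + 1)
    else i

def read_shell_token_py (command : String) (start : Int) : String × Int :=
  let cs := command.toList
  let n : Int := cs.length
  let i := pvALoop cs n (n - start).toNat start
  (PySem.Str.slice command (some start) (some i), i)

-- ===== PORT B =====
-- Python's command.find(c, i) for 0 ≤ i (the only way B calls it): first index ≥ i holding c,
-- else -1. Ported exactly (for nonnegative i) via findIdx? on the dropped suffix.
def pvFindFrom (cs : List Char) (c : Char) (i : Int) : Int :=
  match (cs.drop i.toNat).findIdx? (fun x => x == c) with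
  | some k => i + (k : Int)
  | none => -1

-- B's _dq_end while-True loop
def pvDqJump (cs : List Char) (n : Int) : Nat → Int → Int
  | 0, _ => n   -- fuel exhausted (unreachable with the fuel supplied at the call site)
  | k + 1, i =>
    let b := pvFindFrom cs '\\' i
    let q := pvFindFrom cs '"' i
    if b = -1 ∧ q = -1 then n
    else if b ≠ -1 ∧ (q = -1 ∨ b < q) then
      (if b + 1 < n then pvDqJump cs n k (b + 2) else n)
    else q + 1

-- B's outer while-loop
def pvBLoop (cs : List Char) (n : Int) : Nat → Int → Int
  | 0, i => i
  | k + 1, i =>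
    if i < n then
      match PySem.List.pyGet? cs i with
      | none => i
      | some ch =>
        if PySem.Chars.isspace ch || ch = ';' || ch = '|' || ch = '&' || ch = '(' || ch = ')' then i
        else if ch = '\'' then
          (let j := pvFindFrom cs '\'' (i + 1);
           pvBLoop cs n k (if j < 0 then n else j + 1))
        else if ch = '"' then pvBLoop cs n k (pvDqJump cs n ((n - (i + 1)).toNat + 1) (i + 1))
        else if ch = '\\' ∧ i + 1 < n then pvBLoop cs n k (i + 2)
        else pvBLoop cs n k (i + 1)
    else i

def read_shell_token_py_alt (command : String) (start : Int) : String × Int :=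
  let cs := command.toList
  let n : Int := cs.length
  let i := pvBLoop cs n (n - start).toNat start
  (PySem.Str.slice command (some start) (some i), i)

-- ===== PRECONDITION & SPEC =====
-- Pre_ restricts to nonnegative start, the natural domain of a tokenizer resume index: for negative
-- start Python's negative-index wraparound makes A's (and B's) results accidental, and for
-- start < -len(command) A raises IndexError.
def Pre_read_shell_token_py (command : String) (start : Int) : Prop := 0 ≤ start
instance (command : String) (start : Int) : Decidable (Pre_read_shell_token_py command start) := by
  unfold Pre_read_shell_token_py; infer_instance

def pvWitness_read_shell_token_py : String × Int := ("echo 'a b' c", 0)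

def Spec_read_shell_token_py (command : String) (start : Int) (out : String × Int) : Prop :=
  out = read_shell_token_py_alt command start
instance (command : String) (start : Int) (out : String × Int) : Decidable (Spec_read_shell_token_py command start out) := by
  unfold Spec_read_shell_token_py; infer_instance

-- ===== CLAIM (what is proved, stated in full; the proofs are below) =====
def Claim_equal_read_shell_token_py : Prop := ∀ (command : String) (start : Int), Dom_read_shell_token_py command start → Pre_read_shell_token_py command start → Spec_read_shell_token_py command start (read_shell_token_py command start)

-- ===== LEMMAS AND PROOFS =====

-- pvFindFrom: out-of-range start finds nothing
theorem pvFindFrom_ge (cs : List Char) (c : Char) (i : Int) (h : (cs.length : Int) ≤ i) :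
    pvFindFrom cs c i = -1 := by
  unfold pvFindFrom
  rw [List.drop_eq_nil_of_le (by omega : cs.length ≤ i.toNat)]
  rfl

-- pvFindFrom: hit at the start position
theorem pvFindFrom_hit (cs : List Char) (c : Char) (i : Int) (h0 : 0 ≤ i)
    (h1 : i < (cs.length : Int)) (hc : cs[i.toNat]'(by omega) = c) :
    pvFindFrom cs c i = i := by
  unfold pvFindFrom
  rw [List.drop_eq_getElem_cons (by omega : i.toNat < cs.length), List.findIdx?_cons, hc,
      if_pos (by simp)]
  simp only []
  omega

-- pvFindFrom: miss at the start position steps to i+1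
theorem pvFindFrom_miss (cs : List Char) (c : Char) (i : Int) (h0 : 0 ≤ i)
    (h1 : i < (cs.length : Int)) (hc : cs[i.toNat]'(by omega) ≠ c) :
    pvFindFrom cs c i = pvFindFrom cs c (i + 1) := by
  unfold pvFindFrom
  rw [List.drop_eq_getElem_cons (by omega : i.toNat < cs.length), List.findIdx?_cons]
  have ht : (i + 1).toNat = i.toNat + 1 := by omega
  rw [ht]
  simp only [beq_iff_eq, hc, if_false]
  cases hf : (cs.drop (i.toNat + 1)).findIdx? (fun x => x == c) with
  | none => rfl
  | some k => simp only [Option.map_some]; omega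

-- pvFindFrom: the result is -1 or a valid index ≥ i
theorem pvFindFrom_spec (cs : List Char) (c : Char) (i : Int) (h0 : 0 ≤ i) :
    pvFindFrom cs c i = -1 ∨ (i ≤ pvFindFrom cs c i ∧ pvFindFrom cs c i < (cs.length : Int)) := by
  unfold pvFindFrom
  cases hf : (cs.drop i.toNat).findIdx? (fun x => x == c) with
  | none => left; rfl
  | some k =>
    right
    have hk := (List.findIdx?_eq_some_iff_findIdx_eq.mp hf).1
    simp only [List.length_drop] at hk
    simp only []
    constructor <;> omega

-- A's double-quote scan is stable at or past the end
theorem pvDqScan_ge (cs : List Char) (n : Int) (k : Nat) (i : Int) (h : n ≤ i) :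
    pvDqScan cs n k i = i := by
  cases k with
  | zero => rfl
  | succ k => unfold pvDqScan; rw [if_neg (by omega)]

-- A's single-quote scan equals B's single find-jump
theorem pvSq_eq_find (cs : List Char) (k : Nat) : ∀ i : Int, 0 ≤ i → i ≤ (cs.length : Int) →
    (cs.length : Int) - i ≤ (k : Int) →
    pvSqScan cs (cs.length : Int) k i =
      (if pvFindFrom cs '\'' i < 0 then (cs.length : Int) else pvFindFrom cs '\'' i + 1) := by
  induction k with
  | zero =>
    intro i h0 h1 hk
    have hi : i = (cs.length : Int) := by omega
    subst hi
    have hF := pvFindFrom_ge cs '\'' (cs.length : Int) (le_refl _)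
    simp [pvSqScan, hF]
  | succ k ih =>
    intro i h0 h1 hk
    by_cases hi : i < (cs.length : Int)
    · have hg : PySem.List.pyGet? cs i = some (cs[i.toNat]'(by omega)) :=
        PySem.List.pyGet?_eq_some_getElem cs h0 hi
      unfold pvSqScan
      rw [if_pos hi, hg]
      simp only []
      by_cases hc : cs[i.toNat]'(by omega) = '\''
      · rw [pvFindFrom_hit cs '\'' i h0 hi hc]
        simp only [hc, ne_eq, not_true_eq_false, if_false]
        rw [if_neg (by omega)]
      · rw [pvFindFrom_miss cs '\'' i h0 hi hc]
        simp only [ne_eq, hc, not_false_eq_true, if_true]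
        exact ih (i + 1) (by omega) (by omega) (by omega)
    · have hi' : i = (cs.length : Int) := by omega
      subst hi'
      unfold pvSqScan
      rw [if_neg (by omega)]
      have hF := pvFindFrom_ge cs '\'' (cs.length : Int) (le_refl _)
      simp [hF]

-- B's dq jump ignores a non-special character at its start position
theorem pvDqJump_skip (cs : List Char) (k : Nat) (i : Int) (h0 : 0 ≤ i)
    (h1 : i < (cs.length : Int)) (hb : cs[i.toNat]'(by omega) ≠ '\\')
    (hq : cs[i.toNat]'(by omega) ≠ '"') :
    pvDqJump cs (cs.length : Int) (k + 1) i = pvDqJump cs (cs.length : Int) (k + 1) (i + 1) := by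
  unfold pvDqJump
  rw [pvFindFrom_miss cs '\\' i h0 h1 hb, pvFindFrom_miss cs '"' i h0 h1 hq]

-- A's double-quote scan equals B's find-jump loop
theorem pvDq_eq_jump (cs : List Char) (k : Nat) : ∀ (k2 : Nat) (i : Int), 0 ≤ i →
    i ≤ (cs.length : Int) → (cs.length : Int) - i ≤ (k : Int) →
    (cs.length : Int) - i < (k2 : Int) →
    pvDqScan cs (cs.length : Int) k i = pvDqJump cs (cs.length : Int) k2 i := by
  induction k with
  | zero =>
    intro k2 i h0 h1 hk hk2
    have hi : i = (cs.length : Int) := by omega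
    subst hi
    cases k2 with
    | zero => exact absurd hk2 (by omega)
    | succ k2 =>
      have hF1 := pvFindFrom_ge cs '\\' (cs.length : Int) (le_refl _)
      have hF2 := pvFindFrom_ge cs '"' (cs.length : Int) (le_refl _)
      simp [pvDqScan, pvDqJump, hF1, hF2]
  | succ k ih =>
    intro k2 i h0 h1 hk hk2
    by_cases hi : i < (cs.length : Int)
    · cases k2 with
      | zero => exact absurd hk2 (by omega)
      | succ k2 =>
        have hg : PySem.List.pyGet? cs i = some (cs[i.toNat]'(by omega)) :=
          PySem.List.pyGet?_eq_some_getElem cs h0 hi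
        unfold pvDqScan pvDqJump
        rw [if_pos hi, hg]
        simp only []
        by_cases hb : cs[i.toNat]'(by omega) = '\\'
        · have hq : cs[i.toNat]'(by omega) ≠ '"' := by rw [hb]; decide
          have hbf := pvFindFrom_hit cs '\\' i h0 hi hb
          have hqf := pvFindFrom_miss cs '"' i h0 hi hq
          rw [hbf, hqf]
          by_cases hnx : i + 1 < (cs.length : Int)
          · -- escape: both advance to i + 2
            have hqs := pvFindFrom_spec cs '"' (i + 1) (by omega)
            rw [if_pos ⟨hb, hnx⟩,
                if_neg (by rintro ⟨hcon, -⟩; omega),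
                if_pos ⟨by omega, by rcases hqs with h | h; exact Or.inl h; exact Or.inr (by omega)⟩,
                if_pos (by omega)]
            exact ih k2 (i + 2) (by omega) (by omega) (by omega) (by omega)
          · -- backslash is the last character: both end at n
            have hqe : pvFindFrom cs '"' (i + 1) = -1 := pvFindFrom_ge cs '"' (i + 1) (by omega)
            rw [hqe, if_neg (by rintro ⟨-, h⟩; omega), if_neg (by rw [hb]; decide),
                pvDqScan_ge cs _ k (i + 1) (by omega)]
            split_ifs <;> omega
        · by_cases hq : cs[i.toNat]'(by omega) = '"'
          · -- closing quote: both return i + 1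
            have hbf := pvFindFrom_miss cs '\\' i h0 hi hb
            have hqf := pvFindFrom_hit cs '"' i h0 hi hq
            have hbs := pvFindFrom_spec cs '\\' (i + 1) (by omega)
            rw [hbf, hqf, if_neg (by rintro ⟨h, -⟩; exact hb h), if_pos hq]
            rcases hbs with h | h
            · rw [h]; split_ifs with hA hB <;> omega
            · split_ifs with hA hB <;> omega
          · -- plain character: A steps, B's jump is unchanged
            rw [if_neg (by rintro ⟨h, -⟩; exact hb h), if_neg hq]
            have hskip := pvDqJump_skip cs k2 i h0 hi hb hq
            unfold pvDqJump at hskip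
            rw [hskip]
            exact ih (k2 + 1) (i + 1) (by omega) (by omega) (by omega) (by omega)
    · have hi' : i = (cs.length : Int) := by omega
      subst hi'
      cases k2 with
      | zero => exact absurd hk2 (by omega)
      | succ k2 =>
        have hF1 := pvFindFrom_ge cs '\\' (cs.length : Int) (le_refl _)
        have hF2 := pvFindFrom_ge cs '"' (cs.length : Int) (le_refl _)
        simp [pvDqScan, pvDqJump, hF1, hF2]

-- A's double-quote scan never moves i backwards
theorem le_pvDqScan (cs : List Char) (n : Int) (k : Nat) : ∀ i : Int, i ≤ pvDqScan cs n k i := by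
  induction k with
  | zero => intro i; simp [pvDqScan]
  | succ k ih =>
    intro i
    unfold pvDqScan
    split
    · split
      · omega
      · split
        · have := ih (i + 2); omega
        · split
          · omega
          · have := ih (i + 1); omega
    · omega

-- The outer loops agree (same fuel, nonnegative index)
theorem pvLoop_eq (cs : List Char) (k : Nat) : ∀ i : Int, 0 ≤ i →
    (cs.length : Int) - i ≤ (k : Int) →
    pvBLoop cs (cs.length : Int) k i = pvALoop cs (cs.length : Int) k i := by
  induction k with
  | zero => intro i _ _; rfl
  | succ k ih =>
    intro i h0 hk
    by_cases hi : i < (cs.length : Int)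
    · rcases hg : PySem.List.pyGet? cs i with _ | ch
      · unfold pvBLoop pvALoop
        rw [if_pos hi, if_pos hi, hg]
      · unfold pvBLoop pvALoop
        rw [if_pos hi, if_pos hi, hg]
        simp only []
        split_ifs with hs h1 hj h2 h3
        · rfl
        · -- single quote, no closing quote found: both jump to the end
          rw [pvSq_eq_find cs k (i + 1) (by omega) (by omega) (by omega), if_pos hj]
          exact ih _ (by omega) (by omega)
        · -- single quote closed at the found index
          have hspec := pvFindFrom_spec cs '\'' (i + 1) (by omega)
          rw [pvSq_eq_find cs k (i + 1) (by omega) (by omega) (by omega), if_neg hj]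
          refine ih _ (by omega) ?_
          rcases hspec with h | h
          · omega
          · omega
        · -- double quote: the jump loop replaces A's inner scan
          rw [← pvDq_eq_jump cs k (((cs.length : Int) - (i + 1)).toNat + 1) (i + 1)
                (by omega) (by omega) (by omega) (by omega)]
          have := le_pvDqScan cs (cs.length : Int) k (i + 1)
          exact ih _ (by omega) (by omega)
        · exact ih (i + 2) (by omega) (by omega)
        · exact ih (i + 1) (by omega) (by omega)
    · unfold pvBLoop pvALoop
      rw [if_neg hi, if_neg hi]

-- ===== VERDICT (by name: the statement is the Claim_ definition above) =====
theorem read_shell_token_py_spec : Claim_equal_read_shell_token_py := by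
  intro command start _ hpre
  have h := pvLoop_eq command.toList ((command.toList.length : Int) - start).toNat start hpre (by omega)
  unfold Spec_read_shell_token_py
  simp only [read_shell_token_py, read_shell_token_py_alt, h]
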